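-- pv_equiv track=rewrite | github.com/Mat-hack/edu-data-pipeline | dags/utils/cleaning_rules.py | detect_exact_duplicates
-- ===== SOURCE A (Python) =====
-- from typing import Callable, Dict, Iterable, List, Optional, Tuple
--
-- def detect_exact_duplicates(values: Iterable[str]) -> Dict[str, bool]:
--     seen = set()
--     flags = {}
--     for v in values:
--         if v in seen:
--             flags[v] = True
--         else:
--             seen.add(v)
--             flags[v] = False
--     return flags
-- ===== SOURCE B (Python) =====
-- def detect_exact_duplicates(values):
--     # count-then-map: one counting pass, then flag each distinct value once
--     counts = {}
--     for v in values:
--         counts[v] = counts.get(v, 0) + 1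
--     return {v: c > 1 for v, c in counts.items()}
-- ===== Notes on version B (the rewrite author's own statement) =====
-- stated objective: alternative
-- what changed: Replaces the seen-set with per-element if/else flag updates by a two-pass count-then-map: build a frequency dict in one pass, then emit {v: count>1} over the distinct keys in first-seen order.
import Mathlib
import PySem

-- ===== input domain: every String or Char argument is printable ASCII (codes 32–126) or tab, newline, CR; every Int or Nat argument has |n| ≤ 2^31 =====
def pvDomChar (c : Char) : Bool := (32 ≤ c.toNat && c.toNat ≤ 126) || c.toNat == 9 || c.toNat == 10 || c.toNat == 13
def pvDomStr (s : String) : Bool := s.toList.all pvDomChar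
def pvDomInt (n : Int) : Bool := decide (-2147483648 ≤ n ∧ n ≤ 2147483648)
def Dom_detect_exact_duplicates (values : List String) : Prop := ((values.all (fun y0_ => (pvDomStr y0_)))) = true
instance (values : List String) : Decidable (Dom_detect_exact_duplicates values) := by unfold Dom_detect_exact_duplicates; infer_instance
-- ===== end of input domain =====

-- B replaces A's seen-set with incremental flag updates by a two-pass count-then-map (alternative decomposition, same cost).

-- ===== PORT A =====
-- one pass: seen-set membership decides True/False, flags dict updated per element
def detect_exact_duplicates (values : List String) : List (String × Bool) :=
  let st := values.foldl
    (fun (st : PySem.Set String × PySem.Dict String Bool) v =>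
      if PySem.Set.contains st.1 v then (st.1, st.2.insert v true)
      else (PySem.Set.add st.1 v, st.2.insert v false))
    (PySem.Set.empty, PySem.Dict.empty)
  st.2.items

-- ===== PORT B =====
-- pass 1: frequency dict; pass 2: map each distinct key to (count > 1)
def detect_exact_duplicates_alt (values : List String) : List (String × Bool) :=
  let counts := values.foldl
    (fun (d : PySem.Dict String Int) v => d.insert v (d.getD v 0 + 1))
    PySem.Dict.empty
  counts.items.map (fun p => (p.1, decide (1 < p.2)))

-- ===== PRECONDITION & SPEC =====
def Spec_detect_exact_duplicates (values : List String) (out : List (String × Bool)) : Prop := out = detect_exact_duplicates_alt values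
instance (values : List String) (out : List (String × Bool)) : Decidable (Spec_detect_exact_duplicates values out) := by unfold Spec_detect_exact_duplicates; infer_instance

-- ===== CLAIM (what is proved, stated in full; the proofs are below) =====
def Claim_equal_detect_exact_duplicates : Prop := ∀ (values : List String), Dom_detect_exact_duplicates values → Spec_detect_exact_duplicates values (detect_exact_duplicates values)

-- ===== LEMMAS AND PROOFS =====

-- the flags dict A maintains after processing the list `p`, stated as a closed form
def pvFlags (p : List String) : PySem.Dict String Bool :=
  PySem.Dict.mk ((PySem.Set.ofList p).map (fun k => (k, decide (1 < p.count k))))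

lemma pvFlags_keys (p : List String) : (pvFlags p).keys = PySem.Set.ofList p := by
  simp [pvFlags, PySem.Dict.keys, List.map_map, Function.comp_def]

lemma pvFlags_contains (p : List String) (v : String) :
    (pvFlags p).contains v = decide (v ∈ p) := by
  rw [PySem.Dict.contains_eq_decide_mem_keys, pvFlags_keys]
  simp [PySem.Set.mem_ofList]

lemma pvFlags_step_mem (p : List String) (v : String) (h : v ∈ p) :
    (pvFlags p).insert v true = pvFlags (p ++ [v]) := by
  apply PySem.Dict.ext
  rw [PySem.Dict.items_insert_of_contains _ _ (by rw [pvFlags_contains]; simpa)]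
  show ((PySem.Set.ofList p).map _).map _ = _
  rw [List.map_map]
  unfold pvFlags
  show _ = PySem.Dict.items (PySem.Dict.mk _)
  rw [PySem.Set.ofList_append_singleton,
      PySem.Set.add_of_mem (by simpa [PySem.Set.mem_ofList] using h)]
  show _ = (PySem.Set.ofList p).map _
  apply List.map_congr_left
  intro k hk
  by_cases hkv : k = v
  · subst hkv
    have h2 : 1 < (p ++ [k]).count k := by
      have hc : 1 ≤ p.count k := List.one_le_count_iff.mpr h
      simp only [List.count_append, List.count_singleton, beq_self_eq_true, if_true]
      omega
    simp only [Function.comp_def, beq_self_eq_true, if_true, h2, decide_true]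
  · have hvk : v ≠ k := fun he => hkv he.symm
    simp [List.count_append, hvk, hkv]

lemma pvFlags_step_not_mem (p : List String) (v : String) (h : v ∉ p) :
    (pvFlags p).insert v false = pvFlags (p ++ [v]) := by
  apply PySem.Dict.ext
  rw [PySem.Dict.items_insert_of_not_contains _ _ (by rw [pvFlags_contains]; simpa)]
  show (PySem.Set.ofList p).map _ ++ _ = PySem.Dict.items (PySem.Dict.mk _)
  rw [PySem.Set.ofList_append_singleton,
      PySem.Set.add_of_not_mem (by simpa [PySem.Set.mem_ofList] using h)]
  show _ = ((PySem.Set.ofList p) ++ [v]).map _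
  rw [List.map_append]
  congr 1
  · apply List.map_congr_left
    intro k hk
    have hkv : k ≠ v := by
      intro he; exact h (by simpa [PySem.Set.mem_ofList, he] using hk)
    have hvk : v ≠ k := fun he => hkv he.symm
    simp [List.count_append, hvk]
  · have hc : p.count v = 0 := List.count_eq_zero.mpr h
    simp [List.count_append, List.count_singleton, hc]

-- A's loop, run from the state reached after processing `p`, ends in the closed form
lemma pvLoopA (rest p : List String) :
    (rest.foldl
      (fun (st : PySem.Set String × PySem.Dict String Bool) v =>
        if PySem.Set.contains st.1 v then (st.1, st.2.insert v true)
        else (PySem.Set.add st.1 v, st.2.insert v false))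
      (PySem.Set.ofList p, pvFlags p)) =
    (PySem.Set.ofList (p ++ rest), pvFlags (p ++ rest)) := by
  induction rest generalizing p with
  | nil => simp
  | cons v rest ih =>
    rw [List.foldl_cons]
    by_cases h : v ∈ p
    · have hc : PySem.Set.contains (PySem.Set.ofList p) v = true := by
        rw [PySem.Set.contains_iff]; simpa [PySem.Set.mem_ofList]
      rw [hc]
      simp only [if_true]
      have e1 : PySem.Set.ofList p = PySem.Set.ofList (p ++ [v]) := by
        rw [PySem.Set.ofList_append_singleton,
            PySem.Set.add_of_mem (by simpa [PySem.Set.mem_ofList] using h)]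
      rw [pvFlags_step_mem p v h, e1, ih (p ++ [v])]
      simp
    · have hc : PySem.Set.contains (PySem.Set.ofList p) v = false := by
        simp [PySem.Set.contains_eq_listContains, PySem.Set.mem_ofList, h]
      rw [hc]
      simp only [Bool.false_eq_true, if_false]
      have e1 : PySem.Set.add (PySem.Set.ofList p) v = PySem.Set.ofList (p ++ [v]) := by
        rw [PySem.Set.ofList_append_singleton]
      rw [pvFlags_step_not_mem p v h, e1, ih (p ++ [v])]
      simp

lemma pvA_closed (values : List String) :
    detect_exact_duplicates values =
      (PySem.Set.ofList values).map (fun k => (k, decide (1 < values.count k))) := by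
  unfold detect_exact_duplicates
  have h0 : (PySem.Set.empty, (PySem.Dict.empty : PySem.Dict String Bool)) =
      (PySem.Set.ofList ([] : List String), pvFlags []) := rfl
  rw [h0, pvLoopA values []]
  rfl

lemma pvB_closed (values : List String) :
    detect_exact_duplicates_alt values =
      (PySem.Set.ofList values).map (fun k => (k, decide (1 < (values.count k : Int)))) := by
  unfold detect_exact_duplicates_alt
  simp only [PySem.Dict.foldl_insert_getD_add_one_eq_counter, PySem.Dict.items_counter,
    List.map_map]
  rfl

-- ===== VERDICT (by name: the statement is the Claim_ definition above) =====
theorem detect_exact_duplicates_spec : Claim_equal_detect_exact_duplicates := by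
  intro values _
  show detect_exact_duplicates values = detect_exact_duplicates_alt values
  rw [pvA_closed, pvB_closed]
  apply List.map_congr_left
  intro k _
  have : (1 < (values.count k : Int)) ↔ (1 < values.count k) := by exact_mod_cast Iff.rfl
  simp [this]
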